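-- pv_equiv track=rewrite | github.com/gonczor/assignments | AIDS-y/Powracanie/main.py | get_possible_connections
-- ===== SOURCE A (Python) =====
-- def get_possible_connections(number_of_elements, oriented):
--     connections = []
--     if oriented:
--         for i in range(number_of_elements):
--             for j in range(number_of_elements):
--                 if i != j:
--                     connections.append([i, j])
--     else:
--         for i in range(number_of_elements):
--             for j in range(number_of_elements):
--                 if i != j and [j, i] not in connections:
--                     connections.append([i, j])
--     return connections
-- ===== SOURCE B (Python) =====
-- def get_possible_connections(number_of_elements, oriented):
--     # Single pass over i; the undirected case emits the upper triangle directly,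
--     # removing A's O(n^2) membership scan of the output list.
--     connections = []
--     for i in range(number_of_elements):
--         if oriented:
--             connections.extend([i, j] for j in range(i))
--         connections.extend([i, j] for j in range(i + 1, number_of_elements))
--     return connections
-- ===== Notes on version B (the rewrite author's own statement) =====
-- stated objective: alternative
-- what changed: Instead of scanning all n^2 ordered pairs and membership-testing the growing output list for the reversed pair, B emits the pairs directly in one pass: for undirected graphs only the upper triangle j in range(i+1,n), for directed graphs j in range(i) then range(i+1,n), so the quadratic inner scan of the output disappears; intended as faster in the undirected case (a timing run measured 1.7x at the largest size both finished, below its confirmation bar).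
import Mathlib
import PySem

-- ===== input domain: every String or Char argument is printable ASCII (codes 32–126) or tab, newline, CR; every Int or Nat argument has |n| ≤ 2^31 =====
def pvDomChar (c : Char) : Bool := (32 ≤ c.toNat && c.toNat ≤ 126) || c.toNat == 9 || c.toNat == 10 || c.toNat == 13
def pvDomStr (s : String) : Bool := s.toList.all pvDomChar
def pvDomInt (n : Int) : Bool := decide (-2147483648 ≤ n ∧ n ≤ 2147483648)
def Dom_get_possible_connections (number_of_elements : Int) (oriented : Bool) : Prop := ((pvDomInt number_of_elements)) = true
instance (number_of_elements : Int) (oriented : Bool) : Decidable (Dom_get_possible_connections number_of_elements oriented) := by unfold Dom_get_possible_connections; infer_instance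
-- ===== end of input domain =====

-- B emits each pair directly (undirected: upper triangle only) in one pass, removing A's
-- membership scan of the growing output list (an alternative algorithm; equal return value proved).

-- ===== PORT A =====
def get_possible_connections (number_of_elements : Int) (oriented : Bool) : List (List Int) :=
  if oriented then
    (PySem.List.pyRange 0 number_of_elements 1).foldl (fun connections i =>
      (PySem.List.pyRange 0 number_of_elements 1).foldl (fun connections j =>
        if i ≠ j then connections ++ [[i, j]] else connections) connections) []
  else
    (PySem.List.pyRange 0 number_of_elements 1).foldl (fun connections i =>
      (PySem.List.pyRange 0 number_of_elements 1).foldl (fun connections j =>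
        if i ≠ j ∧ [j, i] ∉ connections then connections ++ [[i, j]] else connections) connections) []

-- ===== PORT B =====
def get_possible_connections_alt (number_of_elements : Int) (oriented : Bool) : List (List Int) :=
  (PySem.List.pyRange 0 number_of_elements 1).foldl (fun connections i =>
    (if oriented then
        connections ++ (PySem.List.pyRange 0 i 1).map (fun j => [i, j])
      else connections)
    ++ (PySem.List.pyRange (i + 1) number_of_elements 1).map (fun j => [i, j])) []

-- ===== PRECONDITION & SPEC =====
def Spec_get_possible_connections (number_of_elements : Int) (oriented : Bool) (out : List (List Int)) : Prop := out = get_possible_connections_alt number_of_elements oriented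
instance (number_of_elements : Int) (oriented : Bool) (out : List (List Int)) : Decidable (Spec_get_possible_connections number_of_elements oriented out) := by unfold Spec_get_possible_connections; infer_instance

-- ===== CLAIM (what is proved, stated in full; the proofs are below) =====
def Claim_equal_get_possible_connections : Prop := ∀ (number_of_elements : Int) (oriented : Bool), Dom_get_possible_connections number_of_elements oriented → Spec_get_possible_connections number_of_elements oriented (get_possible_connections number_of_elements oriented)

-- ===== LEMMAS AND PROOFS =====

-- the row emitted for a fixed i in B's undirected pass
def pvRow (n i : Int) : List (List Int) :=
  (PySem.List.pyRange (i + 1) n 1).map (fun j => [i, j])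

lemma filter_ne_range (n i : Int) (h0 : 0 ≤ i) (h1 : i < n) :
    (PySem.List.pyRange 0 n 1).filter (fun j => decide (i ≠ j)) =
      PySem.List.pyRange 0 i 1 ++ PySem.List.pyRange (i + 1) n 1 := by
  rw [PySem.List.pyRange_one_append 0 i n h0 (le_of_lt h1), List.filter_append,
      PySem.List.pyRange_one_cons h1, List.filter_cons_of_neg (by simp),
      List.filter_eq_self.2 (fun x hx => by
        rw [PySem.List.mem_pyRange_one] at hx; simp; omega),
      List.filter_eq_self.2 (fun x hx => by
        rw [PySem.List.mem_pyRange_one] at hx; simp; omega)]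

lemma filter_gt_range (n i : Int) (h0 : 0 ≤ i) (h1 : i < n) :
    (PySem.List.pyRange 0 n 1).filter (fun j => decide (i < j)) =
      PySem.List.pyRange (i + 1) n 1 := by
  rw [PySem.List.pyRange_one_append 0 (i + 1) n (by omega) (by omega), List.filter_append]
  rw [List.filter_eq_nil_iff.2, List.filter_eq_self.2, List.nil_append]
  · intro x hx; rw [PySem.List.mem_pyRange_one] at hx; simp; omega
  · intro x hx; rw [PySem.List.mem_pyRange_one] at hx; simp; omega

-- A's oriented inner loop appends exactly the j ≠ i pairs
lemma innerO (i : Int) (L : List Int) (acc : List (List Int)) :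
    L.foldl (fun c j => if i ≠ j then c ++ [[i, j]] else c) acc =
      acc ++ (L.filter (fun j => decide (i ≠ j))).map (fun j => [i, j]) := by
  have := PySem.List.foldl_append_if (p := fun j => decide (i ≠ j))
    (f := fun j => [(i : Int), j]) (l := L) (acc := acc)
  simpa using this

-- A's undirected inner loop: against an accumulator whose [j,i]-members are exactly j < i
-- (plus already-emitted [i,·] pairs), the condition reduces to i < j.
lemma innerU (i : Int) (P : List (List Int))
    (hP : ∀ j : Int, [j, i] ∈ P ↔ (0 ≤ j ∧ j < i)) :
    ∀ (L : List Int) (M : List Int), (∀ j ∈ L, 0 ≤ j) →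
    L.foldl (fun c j => if i ≠ j ∧ [j, i] ∉ c then c ++ [[i, j]] else c)
        (P ++ M.map (fun j' => [i, j'])) =
      P ++ (M ++ L.filter (fun j => decide (i < j))).map (fun j' => [i, j']) := by
  intro L
  induction L with
  | nil => intro M _; simp
  | cons j L ih =>
    intro M hL
    have hj : 0 ≤ j := hL j (List.mem_cons_self ..)
    simp only [List.foldl_cons, List.filter_cons]
    by_cases hlt : i < j
    · have hnm : [j, i] ∉ P ++ M.map (fun j' => [i, j']) := by
        intro hmem
        rcases List.mem_append.1 hmem with h | h
        · have := (hP j).1 h; omega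
        · rcases List.mem_map.1 h with ⟨j', _, heq⟩
          injection heq with h1 _; omega
      rw [if_pos ⟨by omega, hnm⟩]
      have hd : decide (i < j) = true := by simp [hlt]
      rw [hd]
      have := ih (M ++ [j]) (fun x hx => hL x (List.mem_cons_of_mem _ hx))
      simpa [List.append_assoc] using this
    · have hd : decide (i < j) = false := by simp; omega
      rw [hd]
      have hcond : ¬ (i ≠ j ∧ [j, i] ∉ P ++ M.map (fun j' => [i, j'])) := by
        intro ⟨hne, hnm⟩
        exact hnm (List.mem_append.2 (Or.inl ((hP j).2 ⟨hj, by omega⟩)))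
      rw [if_neg hcond]
      exact ih M (fun x hx => hL x (List.mem_cons_of_mem _ hx))

lemma mem_flatMap_row (n m j i : Int) :
    [j, i] ∈ (PySem.List.pyRange 0 m 1).flatMap (pvRow n) ↔ (0 ≤ j ∧ j < m ∧ j < i ∧ i < n) := by
  simp only [List.mem_flatMap, pvRow, List.mem_map, PySem.List.mem_pyRange_one]
  constructor
  · rintro ⟨a, ⟨ha0, ham⟩, b, ⟨hb1, hb2⟩, heq⟩
    injection heq with h1 h2
    injection h2 with h2 _
    omega
  · rintro ⟨h0, hm', hji, hin⟩
    exact ⟨j, ⟨h0, hm'⟩, i, ⟨by omega, hin⟩, rfl⟩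

-- A's undirected outer loop builds the upper triangle, prefix by prefix
lemma outerU (n : Int) : ∀ (k : Nat) (m : Int), 0 ≤ m → m + k = n →
    (PySem.List.pyRange m n 1).foldl (fun c i =>
        (PySem.List.pyRange 0 n 1).foldl (fun c j =>
          if i ≠ j ∧ [j, i] ∉ c then c ++ [[i, j]] else c) c)
      ((PySem.List.pyRange 0 m 1).flatMap (pvRow n)) =
    (PySem.List.pyRange 0 n 1).flatMap (pvRow n) := by
  intro k
  induction k with
  | zero =>
    intro m h0 hk
    have hmn : m = n := by push_cast at hk; omega
    subst hmn
    rw [PySem.List.pyRange_one_eq_nil le_rfl]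
    simp only [List.foldl_nil]
  | succ k ih =>
    intro m h0 hk
    have hmn : m < n := by push_cast at hk; omega
    rw [PySem.List.pyRange_one_cons hmn, List.foldl_cons]
    have hrow := innerU m ((PySem.List.pyRange 0 m 1).flatMap (pvRow n))
      (fun j => by rw [mem_flatMap_row n m j m]; omega)
      (PySem.List.pyRange 0 n 1) [] (fun j hj => ((PySem.List.mem_pyRange_one).1 hj).1)
    simp only [List.map_nil, List.append_nil, List.nil_append] at hrow
    rw [hrow, filter_gt_range n m h0 hmn]
    have hpref : (PySem.List.pyRange 0 m 1).flatMap (pvRow n) ++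
        (PySem.List.pyRange (m + 1) n 1).map (fun j' => [m, j']) =
        (PySem.List.pyRange 0 (m + 1) 1).flatMap (pvRow n) := by
      rw [PySem.List.pyRange_one_succ_right h0, List.flatMap_append]
      simp [pvRow]
    rw [hpref]
    exact ih (m + 1) (by omega) (by push_cast at hk ⊢; omega)

-- ===== VERDICT (by name: the statement is the Claim_ definition above) =====
theorem get_possible_connections_spec : Claim_equal_get_possible_connections := by
  intro n oriented _
  unfold Spec_get_possible_connections get_possible_connections get_possible_connections_alt
  by_cases hn : 0 ≤ n
  case neg =>
    rw [PySem.List.pyRange_one_eq_nil (by omega)]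
    cases oriented <;> simp
  case pos =>
  cases oriented
  case false =>
    simp only [Bool.false_eq_true, if_false]
    have hA := outerU n n.toNat 0 le_rfl (by omega)
    rw [PySem.List.pyRange_one_eq_nil (le_refl 0)] at hA
    simp only [List.flatMap_nil] at hA
    rw [hA, PySem.List.foldl_append_eq_flatMap]
    unfold pvRow
    rfl
  case true =>
    simp only [if_true]
    have hcong : (PySem.List.pyRange 0 n 1).foldl (fun c i =>
        (PySem.List.pyRange 0 n 1).foldl (fun c j =>
          if i ≠ j then c ++ [[i, j]] else c) c) [] =
      (PySem.List.pyRange 0 n 1).foldl (fun c i =>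
        c ++ ((PySem.List.pyRange 0 i 1).map (fun j => [i, j]) ++
              (PySem.List.pyRange (i + 1) n 1).map (fun j => [i, j]))) [] := by
      apply PySem.List.foldl_congr_mem
      intro acc i hi
      rw [PySem.List.mem_pyRange_one] at hi
      rw [innerO, filter_ne_range n i hi.1 hi.2, List.map_append]
    rw [hcong]
    apply PySem.List.foldl_congr_mem
    intro acc i _
    simp [List.append_assoc]
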